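-- pv_equiv track=rewrite | github.com/eshun4/FundamentalCodingInterviewPrep | 07/consecetive_letters.py | count_consecjutive_letters_stretch1
-- ===== SOURCE A (Python) =====
-- def count_consecjutive_letters_stretch1(str_inp):
--     """This function counts the number of consecutive letters in the string input provided."""
--     # Create an array to store the consecutive letters
--     consecutive_letters= []
--     # Create another variable to keep track of the previous letter
--     prev_letter = None
--     # Iterate through each letter in the string
--     for lett in str_inp:
--         if prev_letter == lett:
--             consecutive_letters.append(prev_letter + lett)
--         prev_letter = lett
--     # Return the consecutive letter count
--     return consecutive_letters
-- ===== SOURCE B (Python) =====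
-- def count_consecjutive_letters_stretch1(str_inp):
--     """Run-based: split the string into maximal runs of equal characters,
--     then emit L-1 doubled characters per run of length L."""
--     out = []
--     i, n = 0, len(str_inp)
--     while i < n:
--         j = i
--         while j < n and str_inp[j] == str_inp[i]:
--             j += 1
--         out.extend([str_inp[i] * 2] * (j - i - 1))
--         i = j
--     return out
-- ===== Notes on version B (the rewrite author's own statement) =====
-- stated objective: alternative
-- what changed: Replaces the char-by-char scan that tracks a previous letter with a two-level run decomposition: an outer loop finds each maximal run of equal characters and emits L-1 doubled characters at once.
import Mathlib
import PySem

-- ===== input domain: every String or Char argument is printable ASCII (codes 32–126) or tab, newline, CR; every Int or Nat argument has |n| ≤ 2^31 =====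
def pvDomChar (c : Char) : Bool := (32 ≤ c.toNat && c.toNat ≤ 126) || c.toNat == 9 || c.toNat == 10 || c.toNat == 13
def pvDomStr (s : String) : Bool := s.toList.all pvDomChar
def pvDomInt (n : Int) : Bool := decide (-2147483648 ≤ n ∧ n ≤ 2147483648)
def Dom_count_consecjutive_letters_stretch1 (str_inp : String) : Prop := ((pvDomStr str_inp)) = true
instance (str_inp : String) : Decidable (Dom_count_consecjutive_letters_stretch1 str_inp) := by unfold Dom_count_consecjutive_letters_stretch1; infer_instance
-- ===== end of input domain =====

-- B replaces A's char-by-char scan with prev-tracking by a run decomposition (maximal runs, then L-1 doubled chars per run); alternative structure, same cost.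


-- ===== PORT A =====
-- the for-loop of A: state = (prev_letter, consecutive_letters)
def pvALoop : List Char → Option Char → List String → List String
  | [], _, acc => acc
  | lett :: rest, prev, acc =>
      pvALoop rest (some lett)
        (if prev == some lett then acc ++ [String.ofList [lett, lett]] else acc)

def count_consecjutive_letters_stretch1 (str_inp : String) : List String :=
  pvALoop str_inp.toList none []

-- ===== PORT B =====
-- inner while loop of B: scan the leading run of characters equal to c;
-- returns (number of further equal chars, remaining suffix)
def pvSplitRun (c : Char) : List Char → Nat × List Char
  | [] => (0, [])
  | d :: t => if d == c then let p := pvSplitRun c t; (p.1 + 1, p.2) else (0, d :: t)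

theorem pvSplitRun_length (c : Char) : ∀ l : List Char, (pvSplitRun c l).2.length ≤ l.length := by
  intro l
  induction l with
  | nil => simp [pvSplitRun]
  | cons d t ih =>
      simp only [pvSplitRun]
      split
      · exact Nat.le_succ_of_le ih
      · simp

-- outer while loop of B: for each maximal run of length L emit L-1 doubled chars
def pvBLoop : List Char → List String
  | [] => []
  | c :: t =>
      let p := pvSplitRun c t
      List.replicate ((p.1 + 1) - 1) (String.ofList [c, c]) ++ pvBLoop p.2
  termination_by l => l.length
  decreasing_by
    simpa using Nat.lt_succ_of_le (pvSplitRun_length c t)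

def count_consecjutive_letters_stretch1_alt (str_inp : String) : List String :=
  pvBLoop str_inp.toList

-- ===== PRECONDITION & SPEC =====
def Spec_count_consecjutive_letters_stretch1 (str_inp : String) (out : List String) : Prop := out = count_consecjutive_letters_stretch1_alt str_inp
instance (str_inp : String) (out : List String) : Decidable (Spec_count_consecjutive_letters_stretch1 str_inp out) := by unfold Spec_count_consecjutive_letters_stretch1; infer_instance

-- ===== CLAIM (what is proved, stated in full; the proofs are below) =====
def Claim_equal_count_consecjutive_letters_stretch1 : Prop := ∀ (str_inp : String), Dom_count_consecjutive_letters_stretch1 str_inp → Spec_count_consecjutive_letters_stretch1 str_inp (count_consecjutive_letters_stretch1 str_inp)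

-- ===== LEMMAS AND PROOFS =====

-- accumulator-free characterisation of A's loop
def pvPairs : Option Char → List Char → List String
  | _, [] => []
  | prev, c :: t =>
      (if prev == some c then [String.ofList [c, c]] else []) ++ pvPairs (some c) t

theorem pvALoop_eq (l : List Char) : ∀ (prev : Option Char) (acc : List String),
    pvALoop l prev acc = acc ++ pvPairs prev l := by
  induction l with
  | nil => intro prev acc; simp [pvALoop, pvPairs]
  | cons c t ih =>
      intro prev acc
      simp only [pvALoop, pvPairs, ih]
      split <;> simp

theorem pvPairs_some_run (c : Char) : ∀ t : List Char,
    pvPairs (some c) t =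
      List.replicate (pvSplitRun c t).1 (String.ofList [c, c]) ++ pvPairs none (pvSplitRun c t).2 := by
  intro t
  induction t with
  | nil => simp [pvPairs, pvSplitRun]
  | cons d t ih =>
      by_cases h : d = c
      · subst h
        simp only [pvSplitRun, pvPairs]
        simp [List.replicate_succ, ih]
      · have hb : (d == c) = false := by simp [h]
        simp [pvSplitRun, pvPairs, hb, Ne.symm h]

theorem pvPairs_none_eq_pvBLoop : ∀ (n : Nat) (l : List Char), l.length ≤ n →
    pvPairs none l = pvBLoop l := by
  intro n
  induction n with
  | zero =>
      intro l hl
      have : l = [] := List.eq_nil_of_length_eq_zero (Nat.le_zero.mp hl)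
      subst this; simp [pvPairs, pvBLoop]
  | succ n ih =>
      intro l hl
      cases l with
      | nil => simp [pvPairs, pvBLoop]
      | cons c t =>
          have h1 : pvPairs none (c :: t) = pvPairs (some c) t := by
            simp [pvPairs]
          rw [h1, pvPairs_some_run, pvBLoop]
          have hr : (pvSplitRun c t).2.length ≤ n :=
            le_trans (pvSplitRun_length c t) (Nat.lt_succ_iff.mp (Nat.lt_succ_of_le (Nat.le_of_succ_le_succ hl)))
          rw [ih _ hr]
          simp

-- ===== VERDICT (by name: the statement is the Claim_ definition above) =====
theorem count_consecjutive_letters_stretch1_spec : Claim_equal_count_consecjutive_letters_stretch1 := by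
  intro s _
  unfold Spec_count_consecjutive_letters_stretch1 count_consecjutive_letters_stretch1 count_consecjutive_letters_stretch1_alt
  rw [pvALoop_eq, pvPairs_none_eq_pvBLoop s.toList.length s.toList le_rfl]
  simp
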